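-- pv_equiv track=rewrite | github.com/PhanHongDat/Networks-Security | PhanNhom.py | group_characters
-- ===== SOURCE A (Python) =====
-- from collections import Counter
--
-- def group_characters(text, group_size):
--     text = "".join(filter(str.isalpha, text.upper()))  # Loại bỏ dấu cách, dấu câu
--     grouped = [text[i::group_size] for i in range(group_size)]
--
--     result = {}
--     for i, group in enumerate(grouped):
--         counter = Counter(group)
--         result[f"Nhóm {i+1}"] = counter
--
--     return result
-- ===== SOURCE B (Python) =====
-- from collections import Counter
--
-- def group_characters(text, group_size):
--     letters = [c for c in text.upper() if c.isalpha()]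
--     if group_size <= 0:
--         return {}
--     counters = [Counter() for _ in range(group_size)]
--     for idx, ch in enumerate(letters):
--         counters[idx % group_size][ch] += 1
--     return {f"Nhóm {i+1}": counters[i] for i in range(group_size)}
-- ===== Notes on version B (the rewrite author's own statement) =====
-- stated objective: alternative
-- what changed: Replaces A's group_size strided string slices each fed to Counter() by a single distribution pass: one enumerate loop over the filtered letters routes each character to counter idx % group_size, and the keyed dict is assembled at the end.
import Mathlib
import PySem

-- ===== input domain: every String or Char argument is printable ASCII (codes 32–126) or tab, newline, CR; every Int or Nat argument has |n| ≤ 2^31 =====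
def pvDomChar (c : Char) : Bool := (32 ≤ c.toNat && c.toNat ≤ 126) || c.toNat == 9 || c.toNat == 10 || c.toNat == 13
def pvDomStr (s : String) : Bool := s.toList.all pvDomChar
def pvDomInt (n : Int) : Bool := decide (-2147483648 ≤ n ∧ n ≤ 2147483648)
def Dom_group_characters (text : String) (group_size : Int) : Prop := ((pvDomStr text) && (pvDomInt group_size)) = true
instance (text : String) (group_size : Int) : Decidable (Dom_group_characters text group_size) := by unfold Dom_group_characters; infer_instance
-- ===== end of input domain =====

-- B replaces A's group_size strided slices (each fed to Counter) by one distribution pass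
-- routing every character to counter idx % group_size; same result, different decomposition.


-- ===== PORT A =====
def group_characters (text : String) (group_size : Int) : List (String × List (String × Int)) :=
  -- text = "".join(filter(str.isalpha, text.upper()))   (kept as its list of code points)
  let t : List Char := (PySem.Chars.upper text.toList).filter (fun c => PySem.Chars.isalpha c)
  -- grouped = [text[i::group_size] for i in range(group_size)]
  -- (inside the range, the slice step group_size is ≥ 1 ≠ 0, so slice? is never none; `.getD []` is exact)
  let grouped : List (List Char) := (PySem.List.pyRange 0 group_size 1).map
      (fun i => (PySem.List.slice? t (some i) none group_size).getD [])
  -- result = {}; for i, group in enumerate(grouped): result[f"Nhóm {i+1}"] = Counter(group)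
  let result := (PySem.List.enumerate grouped 0).foldl
      (fun d p => d.insert ("Nhóm " ++ PySem.Int.toStr (p.1 + 1))
        (PySem.Dict.counter (p.2.map (fun c => String.ofList [c])))) PySem.Dict.empty
  result.items.map (fun q => (q.1, q.2.items))

-- ===== PORT B =====
def group_characters_alt (text : String) (group_size : Int) : List (String × List (String × Int)) :=
  -- letters = [c for c in text.upper() if c.isalpha()]
  let letters : List Char := (PySem.Chars.upper text.toList).filter (fun c => PySem.Chars.isalpha c)
  if group_size ≤ 0 then []   -- return {}
  else
    -- counters = [Counter() for _ in range(group_size)]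
    -- for idx, ch in enumerate(letters): counters[idx % group_size][ch] += 1
    -- (idx % group_size is always a valid index of counters, so pyGet?/getD is exact)
    let counters : List (PySem.Dict String Int) :=
      (PySem.List.enumerate letters 0).foldl
        (fun L p =>
          L.set (PySem.Int.mod p.1 group_size).toNat
            (((PySem.List.pyGet? L (PySem.Int.mod p.1 group_size)).getD PySem.Dict.empty).modify
              (String.ofList [p.2]) 0 (· + 1)))
        (List.replicate group_size.toNat PySem.Dict.empty)
    -- return {f"Nhóm {i+1}": counters[i] for i in range(group_size)}
    ((PySem.List.pyRange 0 group_size 1).foldl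
        (fun d i => d.insert ("Nhóm " ++ PySem.Int.toStr (i + 1))
          (PySem.List.pyGetD counters i PySem.Dict.empty)) PySem.Dict.empty).items.map
      (fun q => (q.1, q.2.items))

-- ===== PRECONDITION & SPEC =====
def Spec_group_characters (text : String) (group_size : Int) (out : List (String × List (String × Int))) : Prop := out = group_characters_alt text group_size
instance (text : String) (group_size : Int) (out : List (String × List (String × Int))) : Decidable (Spec_group_characters text group_size out) := by unfold Spec_group_characters; infer_instance

-- ===== CLAIM (what is proved, stated in full; the proofs are below) =====
def Claim_equal_group_characters : Prop := ∀ (text : String) (group_size : Int), Dom_group_characters text group_size → Spec_group_characters text group_size (group_characters text group_size)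

-- ===== LEMMAS AND PROOFS =====

-- the elements of xs at the positions ≡ i (mod g); for i < g this is Python's xs[i::g]
def pvStride {α : Type} (xs : List α) (i g : Nat) : List α :=
  (List.range xs.length).filterMap (fun k => if k % g = i then xs[k]? else none)

theorem pv_fm_range_mono {α : Type} (f : Nat → Option α) {a b : Nat} (hab : a ≤ b)
    (h : ∀ k, a ≤ k → f k = none) : (List.range b).filterMap f = (List.range a).filterMap f := by
  rw [show b = a + (b - a) by omega, List.range_add, List.filterMap_append]
  have h2 : List.filterMap f (List.map (fun x => a + x) (List.range (b - a))) = [] := by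
    rw [List.filterMap_map, List.filterMap_eq_nil_iff]
    intro x _; exact h (a + x) (by omega)
  rw [h2, List.append_nil]

theorem pv_fm_range_eq {α : Type} (f : Nat → Option α) (a b : Nat)
    (h : ∀ k, min a b ≤ k → f k = none) : (List.range a).filterMap f = (List.range b).filterMap f := by
  rcases le_total a b with hab | hab
  · exact (pv_fm_range_mono f hab (fun k hk => h k (by omega))).symm
  · exact pv_fm_range_mono f hab (fun k hk => h k (by omega))

theorem pv_mod_window {i x g : Nat} (hig : i < g) (hxg : x < g) : (i + x) % g = i ↔ x = 0 := by
  constructor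
  · intro h
    by_cases hx : i + x < g
    · rw [Nat.mod_eq_of_lt hx] at h; omega
    · rw [Nat.mod_eq_sub_mod (by omega), Nat.mod_eq_of_lt (by omega)] at h; omega
  · rintro rfl; simpa using Nat.mod_eq_of_lt hig

theorem pv_stride_reindex {α : Type} (xs : List α) (i g : Nat) (hig : i < g) (n : Nat) :
    (List.range (i + g * n)).filterMap (fun k => if k % g = i then xs[k]? else none)
      = (List.range n).filterMap (fun m => xs[i + g * m]?) := by
  induction n with
  | zero =>
    simp only [Nat.mul_zero, Nat.add_zero, List.range_zero, List.filterMap_nil]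
    rw [List.filterMap_eq_nil_iff]
    intro k hk
    simp only [List.mem_range] at hk
    rw [if_neg (by rw [Nat.mod_eq_of_lt (by omega)]; omega)]
  | succ n ih =>
    rw [show i + g * (n + 1) = (i + g * n) + g by ring, List.range_add, List.filterMap_append, ih,
      List.range_succ, List.filterMap_append, List.filterMap_map]
    congr 1
    obtain ⟨g', rfl⟩ : ∃ g', g = g' + 1 := ⟨g - 1, by omega⟩
    have hrest : List.filterMap
        (((fun k => if k % (g' + 1) = i then xs[k]? else none) ∘ (fun x => i + (g' + 1) * n + x)) ∘ Nat.succ)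
        (List.range g') = [] := by
      rw [List.filterMap_eq_nil_iff]
      intro x hx
      simp only [List.mem_range] at hx
      have h1 : (i + (g' + 1) * n + (x + 1)) % (g' + 1) = (i + (x + 1)) % (g' + 1) := by
        rw [show i + (g' + 1) * n + (x + 1) = i + (x + 1) + (g' + 1) * n by ring,
          Nat.add_mul_mod_self_left]
      simp only [Function.comp_apply, Nat.succ_eq_add_one, h1]
      rw [if_neg]
      rw [pv_mod_window hig (by omega)]; omega
    rw [List.range_succ_eq_map, List.filterMap_cons, List.filterMap_map, hrest]
    have h0 : ((fun k => if k % (g' + 1) = i then xs[k]? else none) ∘ (fun x => i + (g' + 1) * n + x)) 0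
        = xs[i + (g' + 1) * n]? := by
      simp only [Function.comp_apply, Nat.add_zero]
      rw [if_pos (by rw [Nat.add_mul_mod_self_left, Nat.mod_eq_of_lt hig])]
    rw [h0]
    cases hx : xs[i + (g' + 1) * n]? with
    | none => simp only [List.filterMap_cons, List.filterMap_nil, hx]
    | some v => simp only [List.filterMap_cons, List.filterMap_nil, hx]


theorem pv_slice_stride {α : Type} (xs : List α) (i g : Nat) (hig : i < g) :
    PySem.List.slice? xs (some (i : Int)) none (g : Int) = some (pvStride xs i g) := by
  have hg : 0 < g := Nat.lt_of_le_of_lt (Nat.zero_le i) hig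
  have h1 : ¬((g : Int) = 0) := by omega
  have h2 : ¬((g : Int) < 0) := by omega
  have h3 : ¬((i : Int) < 0) := by omega
  have h4 : (0 : Int) < (g : Int) := by omega
  simp only [PySem.List.slice?, PySem.List.sliceIndices, h1, h2, h3, h4, if_false, if_true]
  by_cases hlen : xs.length ≤ i
  · rw [min_eq_right (by exact_mod_cast hlen)]
    rw [if_neg (by omega)]
    simp only [List.range_zero, List.filterMap_nil, Option.some.injEq]
    symm
    rw [pvStride, List.filterMap_eq_nil_iff]
    intro k hk
    simp only [List.mem_range] at hk
    rw [if_neg (by rw [Nat.mod_eq_of_lt (by omega)]; omega)]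
  · push Not at hlen
    rw [min_eq_left (by exact_mod_cast hlen.le)]
    rw [if_pos (by exact_mod_cast hlen)]
    have hc : ((xs.length : Int) - (i : Int) + (g : Int) - 1) = ((xs.length - i + g - 1 : Nat) : Int) := by
      omega
    rw [hc, ← Int.natCast_div, Int.toNat_natCast]
    have hfun : ∀ k : Nat, ((i : Int) + (g : Int) * (k : Int)).toNat = i + g * k := by
      intro k
      rw [show ((i : Int) + (g : Int) * (k : Int)) = ((i + g * k : Nat) : Int) by push_cast; ring,
        Int.toNat_natCast]
    simp only [hfun, Option.some.injEq]
    have step1 : (List.range ((xs.length - i + g - 1) / g)).filterMap (fun k => xs[i + g * k]?)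
        = (List.range xs.length).filterMap (fun k => xs[i + g * k]?) := by
      apply pv_fm_range_eq
      intro k hk
      apply List.getElem?_eq_none
      rcases le_total ((xs.length - i + g - 1) / g) xs.length with h | h
      · have h1' : (xs.length - i + g - 1) / g ≤ k := by omega
        have e1 : (xs.length - i + g - 1) / g = (xs.length - i - 1) / g + 1 := by
          rw [show xs.length - i + g - 1 = (xs.length - i - 1) + g by omega, Nat.add_div_right _ hg]
        have e2 := Nat.div_add_mod (xs.length - i - 1) g
        have e3 : (xs.length - i - 1) % g < g := Nat.mod_lt _ hg
        have e4 : g * ((xs.length - i + g - 1) / g) = g * ((xs.length - i - 1) / g) + g := by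
          rw [e1]; ring
        have e6 : g * ((xs.length - i + g - 1) / g) ≤ g * k := Nat.mul_le_mul_left g h1'
        omega
      · have h1' : xs.length ≤ k := by omega
        have h2' : k ≤ g * k := Nat.le_mul_of_pos_left k hg
        omega
    rw [step1, ← pv_stride_reindex xs i g hig xs.length]
    apply pv_fm_range_eq
    intro k hk
    have hlk : xs.length ≤ k := by
      have := Nat.le_mul_of_pos_left xs.length hg
      omega
    split_ifs
    · exact List.getElem?_eq_none hlk
    · rfl

theorem pv_stride_append {α : Type} (xs : List α) (c : α) (i g : Nat) :
    pvStride (xs ++ [c]) i g = pvStride xs i g ++ (if xs.length % g = i then [c] else []) := by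
  unfold pvStride
  rw [List.length_append, List.length_singleton, List.range_succ, List.filterMap_append]
  congr 1
  · apply List.filterMap_congr
    intro k hk
    simp only [List.mem_range] at hk
    rw [List.getElem?_append_left hk]
  · rw [List.filterMap_cons, List.filterMap_nil, List.getElem?_concat_length]
    split_ifs <;> simp

theorem pv_fmod_natCast (a b : Nat) (hb : 0 < b) :
    PySem.Int.mod (a : Int) (b : Int) = ((a % b : Nat) : Int) := by
  show Int.fmod _ _ = _
  rw [Int.fmod_eq_emod, if_pos (Or.inl (by omega : (0:Int) ≤ (b:Int))), add_zero]
  push_cast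
  rfl

theorem pv_binv (t : List Char) (n : Nat) (hn : 0 < n) :
    (PySem.List.enumerate t 0).foldl
      (fun L p =>
        L.set (PySem.Int.mod p.1 (n : Int)).toNat
          (((PySem.List.pyGet? L (PySem.Int.mod p.1 (n : Int))).getD PySem.Dict.empty).modify
            (String.ofList [p.2]) 0 (· + 1)))
      (List.replicate n PySem.Dict.empty)
    = (List.range n).map
        (fun i => PySem.Dict.counter ((pvStride t i n).map (fun c => String.ofList [c]))) := by
  induction t using List.reverseRecOn with
  | nil =>
    rw [show PySem.List.enumerate ([] : List Char) 0 = [] from rfl, List.foldl_nil]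
    apply List.ext_getElem
    · simp
    · intro k h1 h2
      simp only [List.getElem_replicate, List.getElem_map, List.getElem_range]
      have hs : pvStride ([] : List Char) k n = [] := by simp [pvStride]
      rw [hs]
      rfl
  | append_singleton t c ih =>
    rw [PySem.List.enumerate_append, List.foldl_append, ih]
    have hsingle : PySem.List.enumerate [c] (0 + (t.length : Int)) = [((t.length : Int), c)] := by
      simp [PySem.List.enumerate_cons, PySem.List.enumerate_nil]
    rw [hsingle, List.foldl_cons, List.foldl_nil]
    rw [pv_fmod_natCast _ _ hn, Int.toNat_natCast, PySem.List.pyGet?_natCast]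
    have hjn : t.length % n < n := Nat.mod_lt _ hn
    have hget : ((List.range n).map
          (fun i => PySem.Dict.counter ((pvStride t i n).map (fun c => String.ofList [c]))))[t.length % n]?
        = some (PySem.Dict.counter ((pvStride t (t.length % n) n).map (fun c => String.ofList [c]))) := by
      simp [hjn]
    rw [hget, Option.getD_some]
    apply List.ext_getElem
    · simp
    · intro k h1 h2
      have hkn : k < n := by simpa using h2
      rw [List.getElem_set]
      simp only [List.getElem_map, List.getElem_range]
      by_cases hkj : t.length % n = k
      · rw [if_pos hkj, pv_stride_append, if_pos hkj, List.map_append]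
        simp only [List.map_cons, List.map_nil]
        rw [PySem.Dict.counter_append_singleton]
        rw [hkj]
      · rw [if_neg hkj, pv_stride_append, if_neg hkj, List.append_nil]

theorem pv_foldl_insert_pairs {κ ν α β : Type} [BEq κ] (l1 : List α) (l2 : List β)
    (k1 : α → κ) (v1 : α → ν) (k2 : β → κ) (v2 : β → ν) (d : PySem.Dict κ ν)
    (h : l1.map (fun a => (k1 a, v1 a)) = l2.map (fun b => (k2 b, v2 b))) :
    l1.foldl (fun d a => d.insert (k1 a) (v1 a)) d
      = l2.foldl (fun d b => d.insert (k2 b) (v2 b)) d := by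
  have h1 := List.foldl_map (f := fun a => (k1 a, v1 a))
    (g := fun (d : PySem.Dict κ ν) (p : κ × ν) => d.insert p.1 p.2) (l := l1) (init := d)
  have h2 := List.foldl_map (f := fun b => (k2 b, v2 b))
    (g := fun (d : PySem.Dict κ ν) (p : κ × ν) => d.insert p.1 p.2) (l := l2) (init := d)
  simp only at h1 h2
  rw [← h1, h, h2]

-- the two keyed folds build the same dict
theorem pv_main (t : List Char) (n : Nat) (hn : 0 < n) :
    ((PySem.List.enumerate ((PySem.List.pyRange 0 (n : Int) 1).map
        (fun i => (PySem.List.slice? t (some i) none (n : Int)).getD [])) 0).foldl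
        (fun d p => d.insert ("Nhóm " ++ PySem.Int.toStr (p.1 + 1))
          (PySem.Dict.counter (p.2.map (fun c => String.ofList [c])))) PySem.Dict.empty)
    = ((PySem.List.pyRange 0 (n : Int) 1).foldl
        (fun d i => d.insert ("Nhóm " ++ PySem.Int.toStr (i + 1))
          (PySem.List.pyGetD
            ((PySem.List.enumerate t 0).foldl
              (fun L p =>
                L.set (PySem.Int.mod p.1 (n : Int)).toNat
                  (((PySem.List.pyGet? L (PySem.Int.mod p.1 (n : Int))).getD PySem.Dict.empty).modify
                    (String.ofList [p.2]) 0 (· + 1)))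
              (List.replicate n PySem.Dict.empty)) i PySem.Dict.empty)) PySem.Dict.empty) := by
  rw [pv_binv t n hn]
  apply pv_foldl_insert_pairs
  apply List.ext_getElem
  · simp [PySem.List.length_enumerate, PySem.List.length_pyRange_one]
  · intro k h1 h2
    have hkn : k < n := by
      simpa [PySem.List.length_enumerate, PySem.List.length_pyRange_one] using h1
    simp only [List.getElem_map, PySem.List.getElem_enumerate, PySem.List.getElem_pyRange_one,
      zero_add]
    rw [pv_slice_stride t k n hkn, Option.getD_some, PySem.List.pyGetD_natCast,
      PySem.List.getD_map_range _ _ _ _ hkn]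

-- ===== VERDICT (by name: the statement is the Claim_ definition above) =====
theorem group_characters_spec : Claim_equal_group_characters := by
  intro text group_size _
  show group_characters text group_size = group_characters_alt text group_size
  simp only [group_characters, group_characters_alt]
  by_cases hg : group_size ≤ 0
  · rw [if_pos hg, PySem.List.pyRange_one_eq_nil hg]
    simp [PySem.List.enumerate_nil]
    rfl
  · rw [if_neg hg]
    obtain ⟨n, rfl⟩ : ∃ n : Nat, group_size = (n : Int) := ⟨group_size.toNat, by omega⟩
    have hn0 : 0 < n := by omega
    rw [Int.toNat_natCast]
    exact congrArg (fun d => d.items.map (fun q => (q.1, q.2.items))) (pv_main _ n hn0)
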